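-- pv_equiv track=rewrite | github.com/Shubhwastaken/rl_networks | partition.py | check_partition
-- ===== SOURCE A (Python) =====
-- def check_partition(groups, edges):
--     """
--     Validates that no edge exists within any partition group.
--     Used by the RL environment as the validity checker in Phase 1.
--     Invalid actions are masked — the agent never sees them.
--
--     Args:
--         groups: list of lists of nodes
--         edges : list of edges as sorted tuples (u, v)
--
--     Returns:
--         True if valid, False if any edge found within a group
--     """
--     edge_set = set(tuple(sorted(e)) for e in edges)
--     for group in groups:
--         for i in range(len(group)):
--             for j in range(i + 1, len(group)):
--                 u = group[i]
--                 v = group[j]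
--                 if tuple(sorted((u, v))) in edge_set:
--                     return False
--     return True
-- ===== SOURCE B (Python) =====
-- def check_partition(groups, edges):
--     """Scan the edges directly against group membership instead of
--     enumerating every in-group pair against a set of normalized edges."""
--     for u, v in edges:
--         for group in groups:
--             if u == v:
--                 if group.count(u) >= 2:
--                     return False
--             elif u in group and v in group:
--                 return False
--     return True
-- ===== Notes on version B (the rewrite author's own statement) =====
-- stated objective: alternative
-- what changed: B inverts the traversal: instead of building a set of normalized edges and enumerating every ordered pair inside each group, it scans the edges and tests group membership (count for self-loops) directly, with no pair enumeration and no edge set.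
import Mathlib
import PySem

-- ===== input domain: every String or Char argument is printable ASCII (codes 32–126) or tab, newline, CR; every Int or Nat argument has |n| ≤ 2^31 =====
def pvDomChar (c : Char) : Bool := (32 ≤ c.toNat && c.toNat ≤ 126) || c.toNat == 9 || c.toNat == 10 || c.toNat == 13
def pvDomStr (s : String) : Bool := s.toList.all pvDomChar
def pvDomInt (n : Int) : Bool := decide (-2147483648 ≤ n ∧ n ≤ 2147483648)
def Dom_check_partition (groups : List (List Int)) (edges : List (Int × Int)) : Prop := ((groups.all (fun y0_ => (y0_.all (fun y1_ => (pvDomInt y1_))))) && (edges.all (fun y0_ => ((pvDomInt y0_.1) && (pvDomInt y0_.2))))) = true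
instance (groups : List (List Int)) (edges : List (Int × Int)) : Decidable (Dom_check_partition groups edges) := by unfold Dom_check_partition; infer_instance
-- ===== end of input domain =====

-- B scans the edges against group membership instead of enumerating every in-group
-- pair against a set of normalized edges; a genuinely different traversal, same values.

-- ===== PORT A =====
-- tuple(sorted((u, v))) for a 2-tuple: swap iff the second is smaller
def pySorted2 (p : Int × Int) : Int × Int := if p.2 < p.1 then (p.2, p.1) else (p.1, p.2)

def check_partition (groups : List (List Int)) (edges : List (Int × Int)) : Bool :=
  let edge_set : PySem.Set (Int × Int) := PySem.Set.ofList (edges.map pySorted2)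
  -- for group in groups: for i in range(len(group)): for j in range(i+1, len(group)):
  --   if tuple(sorted((u, v))) in edge_set: return False   — early-return loops as `any`
  !(groups.any (fun group =>
      (PySem.List.pyRange 0 group.length 1).any (fun i =>
        (PySem.List.pyRange (i + 1) group.length 1).any (fun j =>
          let u := PySem.List.pyGetD group i 0
          let v := PySem.List.pyGetD group j 0
          PySem.Set.contains edge_set (pySorted2 (u, v))))))

-- ===== PORT B =====
def check_partition_alt (groups : List (List Int)) (edges : List (Int × Int)) : Bool :=
  -- for u, v in edges: for group in groups: … return False — early-return loops as `any`
  !(edges.any (fun e =>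
      groups.any (fun group =>
        if e.1 == e.2 then decide (2 ≤ PySem.List.count group e.1)
        else group.contains e.1 && group.contains e.2)))

-- ===== PRECONDITION & SPEC =====
def Spec_check_partition (groups : List (List Int)) (edges : List (Int × Int)) (out : Bool) : Prop := out = check_partition_alt groups edges
instance (groups : List (List Int)) (edges : List (Int × Int)) (out : Bool) : Decidable (Spec_check_partition groups edges out) := by unfold Spec_check_partition; infer_instance

-- ===== CLAIM (what is proved, stated in full; the proofs are below) =====
def Claim_equal_check_partition : Prop := ∀ (groups : List (List Int)) (edges : List (Int × Int)), Dom_check_partition groups edges → Spec_check_partition groups edges (check_partition groups edges)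

-- ===== LEMMAS AND PROOFS =====

/-- "some pair of positions i < j of xs satisfies P" -/
def HP (P : Int → Int → Prop) (xs : List Int) : Prop :=
  ∃ i j : Nat, i < j ∧ j < xs.length ∧ P (xs.getD i 0) (xs.getD j 0)

theorem HP_nil (P : Int → Int → Prop) : ¬ HP P [] := by
  rintro ⟨i, j, _, hj, _⟩; simp at hj

theorem HP_cons (P : Int → Int → Prop) (a : Int) (l : List Int) :
    HP P (a :: l) ↔ (∃ y ∈ l, P a y) ∨ HP P l := by
  constructor
  · rintro ⟨i, j, hij, hjl, hP⟩
    obtain ⟨k, rfl⟩ : ∃ k, j = k + 1 := ⟨j - 1, by omega⟩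
    have hkl : k < l.length := by simpa using hjl
    cases i with
    | zero =>
      refine Or.inl ⟨l.getD k 0, ?_, by simpa using hP⟩
      rw [List.getD_eq_getElem l 0 hkl]; exact List.getElem_mem _
    | succ i' =>
      exact Or.inr ⟨i', k, by omega, hkl, by simpa using hP⟩
  · rintro (⟨y, hy, hP⟩ | ⟨i, j, hij, hjl, hP⟩)
    · obtain ⟨k, hk, rfl⟩ := List.getElem_of_mem hy
      refine ⟨0, k + 1, by omega, by simpa using hk, ?_⟩
      simp only [List.getD_cons_zero, List.getD_cons_succ]
      rw [List.getD_eq_getElem l 0 hk]; exact hP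
    · exact ⟨i + 1, j + 1, by omega, by simpa using hjl, by simpa using hP⟩

theorem HP_same_iff_count (u : Int) (xs : List Int) :
    HP (fun x y => x = u ∧ y = u) xs ↔ 2 ≤ xs.count u := by
  induction xs with
  | nil =>
    simp only [List.count_nil]
    exact ⟨fun h => absurd h (HP_nil _), by omega⟩
  | cons a l ih =>
    rw [HP_cons, ih]
    by_cases ha : a = u
    · have hc : (a :: l).count u = l.count u + 1 := by simp [ha]
      rw [hc]
      constructor
      · rintro (⟨y, hy, -, rfl⟩ | h)
        · have hpos := List.count_pos_iff.mpr hy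
          omega
        · omega
      · intro h
        by_cases hm : u ∈ l
        · exact Or.inl ⟨u, hm, ha, rfl⟩
        · have h0 := List.count_eq_zero.mpr hm
          omega
    · have hc : (a :: l).count u = l.count u := by simp [ha]
      rw [hc]
      constructor
      · rintro (⟨y, hy, h, -⟩ | h)
        · exact absurd h ha
        · exact h
      · exact Or.inr

theorem HP_ne_iff_mem (u v : Int) (huv : u ≠ v) (xs : List Int) :
    HP (fun x y => (x = u ∧ y = v) ∨ (x = v ∧ y = u)) xs ↔ u ∈ xs ∧ v ∈ xs := by
  induction xs with
  | nil => simp [HP_nil]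
  | cons a l ih =>
    rw [HP_cons, ih]
    constructor
    · rintro (⟨y, hy, (⟨rfl, rfl⟩ | ⟨rfl, rfl⟩)⟩ | ⟨hu, hv⟩) <;> simp_all
    · rintro ⟨hu, hv⟩
      rcases List.mem_cons.mp hu with rfl | hu'
      · rcases List.mem_cons.mp hv with rfl | hv'
        · exact absurd rfl huv
        · exact Or.inl ⟨v, hv', Or.inl ⟨rfl, rfl⟩⟩
      · rcases List.mem_cons.mp hv with rfl | hv'
        · exact Or.inl ⟨u, hu', Or.inr ⟨rfl, rfl⟩⟩
        · exact Or.inr ⟨hu', hv'⟩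

theorem pySorted2_eq_iff (u v x y : Int) :
    pySorted2 (x, y) = pySorted2 (u, v) ↔ (x = u ∧ y = v) ∨ (x = v ∧ y = u) := by
  simp only [pySorted2]
  split_ifs <;> simp only [Prod.mk.injEq] <;> omega

/-- A's double range loop over a group (as the existential `any` unfolds to) is exactly HP. -/
theorem rangeAny_iff_HP (xs : List Int) (Pb : Int → Int → Bool) :
    (∃ i ∈ PySem.List.pyRange 0 xs.length 1, ∃ j ∈ PySem.List.pyRange (i + 1) xs.length 1,
      Pb (PySem.List.pyGetD xs i 0) (PySem.List.pyGetD xs j 0) = true)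
    ↔ HP (fun x y => Pb x y = true) xs := by
  simp only [PySem.List.mem_pyRange_one]
  constructor
  · rintro ⟨i, ⟨hi0, hil⟩, j, ⟨hij, hjl⟩, hP⟩
    refine ⟨i.toNat, j.toNat, by omega, by omega, ?_⟩
    rw [PySem.List.pyGetD_eq_getElem xs 0 hi0 hil,
      PySem.List.pyGetD_eq_getElem xs 0 (by omega) hjl] at hP
    rw [List.getD_eq_getElem xs 0 (by omega), List.getD_eq_getElem xs 0 (by omega)]
    exact hP
  · rintro ⟨i, j, hij, hjl, hP⟩
    refine ⟨(i : Int), ⟨by omega, by omega⟩, (j : Int), ⟨by omega, by omega⟩, ?_⟩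
    rw [PySem.List.pyGetD_natCast, PySem.List.pyGetD_natCast]
    exact hP

/-- per group and per edge: "some pair of positions matches the normalized edge"
    is exactly B's membership/count test. -/
theorem pair_iff_hit (xs : List Int) (u v : Int) :
    HP (fun x y => pySorted2 (x, y) = pySorted2 (u, v)) xs
    ↔ (if u = v then 2 ≤ xs.count u else u ∈ xs ∧ v ∈ xs) := by
  by_cases huv : u = v
  · subst huv
    rw [if_pos rfl, ← HP_same_iff_count u xs]
    exact ⟨fun ⟨i, j, h1, h2, h3⟩ => ⟨i, j, h1, h2, by
        have := (pySorted2_eq_iff u u _ _).mp h3; tauto⟩,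
      fun ⟨i, j, h1, h2, h3⟩ => ⟨i, j, h1, h2, (pySorted2_eq_iff u u _ _).mpr (Or.inl h3)⟩⟩
  · rw [if_neg huv, ← HP_ne_iff_mem u v huv xs]
    exact ⟨fun ⟨i, j, h1, h2, h3⟩ => ⟨i, j, h1, h2, (pySorted2_eq_iff u v _ _).mp h3⟩,
      fun ⟨i, j, h1, h2, h3⟩ => ⟨i, j, h1, h2, (pySorted2_eq_iff u v _ _).mpr h3⟩⟩

theorem check_partition_eq (groups : List (List Int)) (edges : List (Int × Int)) :
    check_partition groups edges = check_partition_alt groups edges := by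
  simp only [check_partition, check_partition_alt]
  refine congrArg Bool.not ?_
  rw [Bool.eq_iff_iff]
  simp only [List.any_eq_true]
  constructor
  · rintro ⟨g, hg, hA⟩
    obtain ⟨i, j, h1, h2, h3⟩ := (rangeAny_iff_HP g
      (fun x y => PySem.Set.contains (PySem.Set.ofList (edges.map pySorted2))
        (pySorted2 (x, y)))).mp hA
    rw [PySem.Set.contains_iff, PySem.Set.mem_ofList, List.mem_map] at h3
    obtain ⟨e, he, hee⟩ := h3
    refine ⟨e, he, g, hg, ?_⟩
    have hhit := (pair_iff_hit g e.1 e.2).mp ⟨i, j, h1, h2, hee.symm⟩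
    by_cases h12 : e.1 = e.2
    · rw [if_pos h12] at hhit
      simpa [h12, PySem.List.count_eq] using hhit
    · rw [if_neg h12] at hhit
      simp [beq_iff_eq, h12, hhit.1, hhit.2]
  · rintro ⟨e, he, g, hg, hB⟩
    refine ⟨g, hg, ?_⟩
    apply (rangeAny_iff_HP g
      (fun x y => PySem.Set.contains (PySem.Set.ofList (edges.map pySorted2))
        (pySorted2 (x, y)))).mpr
    have hhit : (if e.1 = e.2 then 2 ≤ g.count e.1 else e.1 ∈ g ∧ e.2 ∈ g) := by
      by_cases h12 : e.1 = e.2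
      · rw [if_pos h12]
        simpa [h12, PySem.List.count_eq] using hB
      · rw [if_neg h12]
        simpa [beq_iff_eq, h12, List.contains_iff_mem] using hB
    obtain ⟨i, j, h1, h2, h3⟩ := (pair_iff_hit g e.1 e.2).mpr hhit
    refine ⟨i, j, h1, h2, ?_⟩
    exact (PySem.Set.contains_iff _ _).mpr
      ((PySem.Set.mem_ofList _ _).mpr (List.mem_map.mpr ⟨e, he, h3.symm⟩))

-- ===== VERDICT (by name: the statement is the Claim_ definition above) =====
theorem check_partition_spec : Claim_equal_check_partition := by
  intro groups edges _
  exact check_partition_eq groups edges
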